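-- pv_equiv track=rewrite | github.com/lukacslacko/rubikml | rubik_beam.py | simplify_interleaves
-- ===== SOURCE A (Python) =====
-- def simplify_interleaves(steps):
--     if len(steps) == 0:
--         return steps
--     first = steps[0]
--     opposite = {'u': 'd', 'd': 'u', 'l': 'r', 'r': 'l', 'f': 'b', 'b': 'f'}
--     other = opposite[first]
--     count = 1
--     while count < len(steps) and steps[count] in [first, other]:
--         count += 1
--     slice = steps[:count]
--     return sorted(slice) + simplify_interleaves(steps[count:])
-- ===== SOURCE B (Python) =====
-- def simplify_interleaves(steps):
--     opposite = {'u': 'd', 'd': 'u', 'l': 'r', 'r': 'l', 'f': 'b', 'b': 'f'}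
--     out = []
--     group = []
--     pair = None
--     for s in steps:
--         if group and s in pair:
--             group.append(s)
--         else:
--             out.extend(sorted(group))
--             group = [s]
--             pair = (s, opposite[s])
--     out.extend(sorted(group))
--     return out
-- ===== Notes on version B (the rewrite author's own statement) =====
-- stated objective: alternative
-- what changed: Replaced A's recursion on slices (per group: a counting while-loop, then take/drop slices and a recursive call) with a single left-to-right fold that maintains the current run and its opposite-face pair, flushing the sorted run whenever a new face starts.
import Mathlib
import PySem

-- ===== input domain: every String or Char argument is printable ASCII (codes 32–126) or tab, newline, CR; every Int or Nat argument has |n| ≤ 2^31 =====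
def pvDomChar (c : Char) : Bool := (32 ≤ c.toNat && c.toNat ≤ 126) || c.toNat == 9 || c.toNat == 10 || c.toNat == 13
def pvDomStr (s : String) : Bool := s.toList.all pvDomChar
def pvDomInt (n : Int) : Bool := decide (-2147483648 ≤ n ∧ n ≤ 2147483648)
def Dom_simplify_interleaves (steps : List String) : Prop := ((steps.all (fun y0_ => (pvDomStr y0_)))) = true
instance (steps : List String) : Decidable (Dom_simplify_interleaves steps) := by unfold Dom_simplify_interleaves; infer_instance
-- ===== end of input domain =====

-- ===== PORT A =====
-- B changes only the decomposition (fold with a running group instead of recursion on slices); return values are equal.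
-- shared opposite-face table (the same dict literal in both Pythons)
def pvOpposite : PySem.Dict String String :=
  PySem.Dict.ofList [("u","d"),("d","u"),("l","r"),("r","l"),("f","b"),("b","f")]

-- A's while loop: number of leading elements of the tail that are `first` or `other`
def pvRunLenA (first other : String) : List String → Nat
  | [] => 0
  | x :: xs => if x = first ∨ x = other then pvRunLenA first other xs + 1 else 0

def simplify_interleaves : List String → List String
  | [] => []
  | first :: rest =>
    let other := pvOpposite.getD first ""   -- opposite[first]; KeyError excluded by Pre_
    let count := 1 + pvRunLenA first other rest
    PySem.List.sorted ((first :: rest).take count) (fun x => x) false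
      ++ simplify_interleaves ((first :: rest).drop count)
termination_by steps => steps.length
decreasing_by simp only [List.length_drop, List.length_cons]; omega

-- ===== PORT B =====
-- one fold step: extend the current group, or flush it sorted and start a new one
def pvStepB (st : List String × List String × Option (String × String)) (s : String) :
    List String × List String × Option (String × String) :=
  match st with
  | (out, group, pair) =>
    if !group.isEmpty && (match pair with | some (f, o) => s == f || s == o | none => false) then
      (out, group ++ [s], pair)
    else
      (out ++ PySem.List.sorted group (fun x => x) false, [s],
        some (s, pvOpposite.getD s ""))

def simplify_interleaves_alt (steps : List String) : List String :=
  let st := steps.foldl pvStepB ([], [], none)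
  st.1 ++ PySem.List.sorted st.2.1 (fun x => x) false

-- ===== PRECONDITION & SPEC =====
-- Pre_: every element is a face letter; on any other input Python A (and B) raises KeyError at the start of some group.
def Pre_simplify_interleaves (steps : List String) : Prop :=
  ∀ s ∈ steps, s ∈ (["u","d","l","r","f","b"] : List String)
instance (steps : List String) : Decidable (Pre_simplify_interleaves steps) := by
  unfold Pre_simplify_interleaves; infer_instance
def pvWitness_simplify_interleaves : List String := ["u","d","u","l","r","f","b","f","d"]
def Spec_simplify_interleaves (steps : List String) (out : List String) : Prop := out = simplify_interleaves_alt steps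
instance (steps : List String) (out : List String) : Decidable (Spec_simplify_interleaves steps out) := by unfold Spec_simplify_interleaves; infer_instance

-- ===== CLAIM (what is proved, stated in full; the proofs are below) =====
def Claim_equal_simplify_interleaves : Prop := ∀ (steps : List String), Dom_simplify_interleaves steps → Pre_simplify_interleaves steps → Spec_simplify_interleaves steps (simplify_interleaves steps)

-- ===== LEMMAS AND PROOFS =====

-- A's counting loop takes exactly the longest prefix of elements equal to first or other
theorem pvRunLenA_takeWhile (f o : String) (xs : List String) :
    xs.take (pvRunLenA f o xs) = xs.takeWhile (fun x => x == f || x == o) ∧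
    xs.drop (pvRunLenA f o xs) = xs.dropWhile (fun x => x == f || x == o) := by
  induction xs with
  | nil => simp [pvRunLenA]
  | cons x xs ih =>
    by_cases h : x = f ∨ x = o <;>
      simp [pvRunLenA, h, ih.1, ih.2]

theorem pvA_cons (first : String) (rest : List String) :
    simplify_interleaves (first :: rest)
      = PySem.List.sorted (first :: rest.takeWhile (fun x => x == first || x == pvOpposite.getD first "")) (fun x => x) false
          ++ simplify_interleaves (rest.dropWhile (fun x => x == first || x == pvOpposite.getD first "")) := by
  rw [simplify_interleaves, Nat.add_comm 1 (pvRunLenA first (pvOpposite.getD first "") rest)]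
  simp only [List.take_succ_cons, List.drop_succ_cons,
    (pvRunLenA_takeWhile first (pvOpposite.getD first "") rest).1,
    (pvRunLenA_takeWhile first (pvOpposite.getD first "") rest).2]

-- A's group boundary is the takeWhile/dropWhile split at the opposite pair
theorem pvFoldB_inv (steps : List String) : ∀ (f : String) (out group : List String),
    group ≠ [] →
    (steps.foldl pvStepB (out, group, some (f, pvOpposite.getD f ""))).1
        ++ PySem.List.sorted (steps.foldl pvStepB (out, group, some (f, pvOpposite.getD f ""))).2.1 (fun x => x) false
      = out ++ PySem.List.sorted (group ++ steps.takeWhile (fun x => x == f || x == pvOpposite.getD f "")) (fun x => x) false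
          ++ simplify_interleaves (steps.dropWhile (fun x => x == f || x == pvOpposite.getD f "")) := by
  induction steps with
  | nil => intro f out group _; simp [simplify_interleaves]
  | cons s ss ih =>
    intro f out group hg
    by_cases h : s = f ∨ s = pvOpposite.getD f ""
    · have hc : (!group.isEmpty && (s == f || s == pvOpposite.getD f "")) = true := by
        simp [hg, h]
      simp only [List.foldl_cons, pvStepB, hc, if_pos]
      rw [ih f out (group ++ [s]) (by simp)]
      simp [h, List.append_assoc]
    · have hc : (!group.isEmpty && (s == f || s == pvOpposite.getD f "")) = false := by
        push Not at h
        simp [h.1, h.2]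
      simp only [List.foldl_cons, pvStepB, hc, if_neg, Bool.false_eq_true, not_false_iff]
      rw [ih s (out ++ PySem.List.sorted group (fun x => x) false) [s] (by simp)]
      have hp : (List.takeWhile (fun x => x == f || x == pvOpposite.getD f "") (s :: ss)) = [] := by
        push Not at h; simp [h.1, h.2]
      have hd : (List.dropWhile (fun x => x == f || x == pvOpposite.getD f "") (s :: ss)) = s :: ss := by
        push Not at h; simp [h.1, h.2]
      rw [hp, hd, pvA_cons s ss]
      simp [List.append_assoc]

theorem simplify_interleaves_eq_alt (steps : List String) :
    simplify_interleaves steps = simplify_interleaves_alt steps := by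
  have hs : PySem.List.sorted ([] : List String) (fun x => x) false = [] := rfl
  cases steps with
  | nil => simp [simplify_interleaves, simplify_interleaves_alt, hs]
  | cons first rest =>
    unfold simplify_interleaves_alt
    have hc : (!([] : List String).isEmpty && (match (none : Option (String × String)) with
        | some (f, o) => first == f || first == o | none => false)) = false := by simp
    simp only [List.foldl_cons, pvStepB, hc, if_neg, Bool.false_eq_true, not_false_iff]
    rw [pvFoldB_inv rest first (([] : List String) ++ PySem.List.sorted [] (fun x => x) false) [first] (by simp)]
    simp [pvA_cons first rest, hs]

-- ===== VERDICT (by name: the statement is the Claim_ definition above) =====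
theorem simplify_interleaves_spec : Claim_equal_simplify_interleaves := by
  intro steps _ _
  unfold Spec_simplify_interleaves
  exact simplify_interleaves_eq_alt steps
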